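-- pv_equiv track=rewrite | github.com/skyrim4ev3r/leetcode_solutions | algorithms/2_medium/M/03723_maximize_sum_of_squares_of_digits/solution.py | maxSumOfSquares
-- ===== SOURCE A (Python) =====
-- def maxSumOfSquares(num: int, sum: int) -> str:
--     if num * 9 < sum:
--         return ""
--
--     res = ['0'] * num
--
--     for i in range(num):
--         if sum == 0:
--             break
--
--         curr_dig = min(sum, 9)
--         sum -= curr_dig
--         res[i] = chr(ord('0') + curr_dig)
--
--     return "".join(res)
-- ===== SOURCE B (Python) =====
-- def maxSumOfSquares(num: int, sum: int) -> str:
--     # Closed form: no per-digit loop; digit counts derived arithmetically.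
--     if sum < 0 or 9 * num < sum:
--         return ""
--     q, r = divmod(sum, 9)
--     return "9" * q + (str(r) if r else "") + "0" * (num - q - (1 if r else 0))
-- ===== Notes on version B (the rewrite author's own statement) =====
-- stated objective: simpler
-- what changed: Replaces the per-digit greedy loop over a mutable char list by a closed form: q, r = divmod(sum, 9) and direct string multiplication '9'*q + remainder digit + '0'*rest.
-- intended difference: For -48 <= sum < 0 and num >= 1 (an impossible target) A returns a garbage string whose first character is chr(48+sum), e.g. '-0' for (2,-3), while B returns '' meaning 'impossible', which is the intended answer. — e.g. on maxSumOfSquares(2, -3): A returns "-0", B returns ""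
import Mathlib
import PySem

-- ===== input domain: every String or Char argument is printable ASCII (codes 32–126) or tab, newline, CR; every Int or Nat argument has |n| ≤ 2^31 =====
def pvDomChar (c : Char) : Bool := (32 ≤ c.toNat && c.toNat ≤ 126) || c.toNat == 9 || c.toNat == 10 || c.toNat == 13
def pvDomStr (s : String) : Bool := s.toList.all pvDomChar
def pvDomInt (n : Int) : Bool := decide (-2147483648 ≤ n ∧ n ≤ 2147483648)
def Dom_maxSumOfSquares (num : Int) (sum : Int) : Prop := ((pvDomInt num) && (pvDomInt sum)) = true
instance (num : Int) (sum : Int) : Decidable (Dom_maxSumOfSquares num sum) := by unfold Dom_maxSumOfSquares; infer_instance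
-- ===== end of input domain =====

-- B replaces A's per-digit greedy loop by the closed form divmod(sum, 9) (objective: simpler).
-- ===== PORT A =====
-- the for-loop with its break: state is (remaining sum, the mutable char list res)
def pvLoopA : List Int → Int → List Char → List Char
  | [], _, res => res
  | i :: is, s, res =>
    if s = 0 then res
    else
      let c := min s 9
      pvLoopA is (s - c) (res.set i.toNat (Char.ofNat (48 + c).toNat))

def maxSumOfSquares (num : Int) (sum : Int) : String :=
  if num * 9 < sum then ""
  else String.ofList (pvLoopA (PySem.List.pyRange 0 num 1) sum (List.replicate num.toNat '0'))

-- ===== PORT B =====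
def maxSumOfSquares_alt (num : Int) (sum : Int) : String :=
  if sum < 0 ∨ 9 * num < sum then ""
  else
    let q := PySem.Int.floordiv sum 9
    let r := PySem.Int.mod sum 9
    String.ofList (List.replicate q.toNat '9'
      ++ (if r ≠ 0 then (PySem.Int.toStr r).toList else [])
      ++ List.replicate (num - q - (if r ≠ 0 then 1 else 0)).toNat '0')

-- ===== PRECONDITION & SPEC =====
-- Pre_ excludes only the inputs where A RAISES: sum < -48 with num ≥ 1 makes A call chr on a
-- negative code point (ValueError).
def Pre_maxSumOfSquares (num : Int) (sum : Int) : Prop := ¬ (sum < -48 ∧ 1 ≤ num)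
instance (num : Int) (sum : Int) : Decidable (Pre_maxSumOfSquares num sum) := by
  unfold Pre_maxSumOfSquares; infer_instance
def pvWitness_maxSumOfSquares : Int × Int := (3, 13)

-- For -48 ≤ sum < 0 and num ≥ 1 (an impossible target) A returns a garbage string whose first
-- character is chr(48+sum), e.g. "-0" for (2,-3); B returns "" meaning 'impossible', the intended answer.
def D_maxSumOfSquares (num : Int) (sum : Int) : Prop := sum < 0 ∧ -48 ≤ sum ∧ 1 ≤ num
instance (num : Int) (sum : Int) : Decidable (D_maxSumOfSquares num sum) := by
  unfold D_maxSumOfSquares; infer_instance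

def Spec_maxSumOfSquares (num : Int) (sum : Int) (out : String) : Prop :=
  ¬ D_maxSumOfSquares num sum → out = maxSumOfSquares_alt num sum
instance (num : Int) (sum : Int) (out : String) : Decidable (Spec_maxSumOfSquares num sum out) := by
  unfold Spec_maxSumOfSquares; infer_instance

def pvDiffWitness_maxSumOfSquares : Int × Int := (2, -3)
def pvDiffWitnessOut_maxSumOfSquares : String × String := ("-0", "")

-- ===== CLAIM (what is proved, stated in full; the proofs are below) =====
def Claim_unchanged_maxSumOfSquares : Prop := ∀ (num : Int) (sum : Int), Dom_maxSumOfSquares num sum → Pre_maxSumOfSquares num sum → Spec_maxSumOfSquares num sum (maxSumOfSquares num sum)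
def Claim_changed_maxSumOfSquares : Prop := Dom_maxSumOfSquares (pvDiffWitness_maxSumOfSquares.1) (pvDiffWitness_maxSumOfSquares.2) ∧ Pre_maxSumOfSquares (pvDiffWitness_maxSumOfSquares.1) (pvDiffWitness_maxSumOfSquares.2) ∧ D_maxSumOfSquares (pvDiffWitness_maxSumOfSquares.1) (pvDiffWitness_maxSumOfSquares.2) ∧ maxSumOfSquares (pvDiffWitness_maxSumOfSquares.1) (pvDiffWitness_maxSumOfSquares.2) = pvDiffWitnessOut_maxSumOfSquares.1 ∧ maxSumOfSquares_alt (pvDiffWitness_maxSumOfSquares.1) (pvDiffWitness_maxSumOfSquares.2) = pvDiffWitnessOut_maxSumOfSquares.2 ∧ pvDiffWitnessOut_maxSumOfSquares.1 ≠ pvDiffWitnessOut_maxSumOfSquares.2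
def Claim_exact_maxSumOfSquares : Prop := ∀ (num : Int) (sum : Int), Dom_maxSumOfSquares num sum → Pre_maxSumOfSquares num sum → D_maxSumOfSquares num sum → maxSumOfSquares num sum ≠ maxSumOfSquares_alt num sum
-- ===== LEMMAS AND PROOFS =====

-- what A's loop computes on a fresh suffix of zeros, expressed structurally
def pvGreedy : Nat → Int → List Char
  | 0, _ => []
  | n+1, s =>
    if s = 0 then List.replicate (n+1) '0'
    else Char.ofNat (48 + min s 9).toNat :: pvGreedy n (s - min s 9)

theorem pvGreedy_zero (n : Nat) : pvGreedy n 0 = List.replicate n '0' := by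
  cases n <;> simp [pvGreedy]

theorem pvLoopA_length (idxs : List Int) (s : Int) (res : List Char) :
    (pvLoopA idxs s res).length = res.length := by
  induction idxs generalizing s res with
  | nil => simp [pvLoopA]
  | cons i is ih =>
    simp only [pvLoopA]
    split
    · rfl
    · rw [ih]; simp

theorem pvLoopA_spec (n : Nat) : ∀ (a : Nat) (s : Int) (res : List Char),
    res.length = a + n → res.drop a = List.replicate n '0' →
    pvLoopA (PySem.List.pyRange a (a + n) 1) s res = res.take a ++ pvGreedy n s := by
  induction n with
  | zero =>
    intro a s res hlen _
    rw [PySem.List.pyRange_one_eq_nil (by omega)]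
    simp only [pvLoopA, pvGreedy, List.append_nil]
    exact (List.take_of_length_le (by omega)).symm
  | succ n ih =>
    intro a s res hlen hdrop
    rw [PySem.List.pyRange_one_cons (by exact_mod_cast Nat.lt_add_of_pos_right (Nat.succ_pos n))]
    simp only [pvLoopA]
    have hres0 : res = res.take a ++ List.replicate (n + 1) '0' := by
      conv_lhs => rw [← List.take_append_drop a res, hdrop]
    by_cases hs : s = 0
    · rw [if_pos hs, pvGreedy, if_pos hs]
      exact hres0
    · rw [if_neg hs]
      have ha : (a : Int).toNat = a := Int.toNat_natCast a
      set c := min s 9 with hc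
      set ch := Char.ofNat (48 + c).toNat with hch
      have hcast : ((a : Int) + 1) = ((a + 1 : Nat) : Int) := by push_cast; ring
      have hend : (a : Int) + ((n + 1 : Nat) : Int) = ((a + 1 : Nat) : Int) + (n : Nat) := by
        push_cast; ring
      have hlt : a < res.length := by omega
      have hlen' : (res.set a ch).length = (a + 1) + n := by simp; omega
      have hdrop' : (res.set a ch).drop (a + 1) = List.replicate n '0' := by
        have h1 : (res.set a ch).drop (a + 1) = res.drop (a + 1) := by
          apply List.ext_getElem
          · simp
          · intro i hi1 hi2
            rw [List.getElem_drop, List.getElem_drop, List.getElem_set, if_neg (by omega)]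
        have h2 : res.drop (a + 1) = (res.drop a).drop 1 := by
          rw [List.drop_drop, Nat.add_comm]
        rw [h1, h2, hdrop, List.replicate_succ, List.drop_one, List.tail_cons]
      rw [ha, hcast, hend, ih (a + 1) (s - c) (res.set a ch) hlen' hdrop']
      have htake : (res.set a ch).take (a + 1) = res.take a ++ [ch] := by
        apply List.ext_getElem
        · simp [List.length_take]
          omega
        · intro i h1 h2
          simp only [List.getElem_take, List.getElem_set]
          rcases Nat.lt_or_ge i a with hi | hi
          · rw [if_neg (by omega), List.getElem_append_left (by simp [List.length_take] <;> omega)]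
            simp [List.getElem_take]
          · have hia : i = a := by simp [List.length_take] at h1; omega
            subst hia
            rw [if_pos rfl, List.getElem_append_right (by simp [List.length_take] <;> omega)]
            simp [List.length_take, Nat.min_eq_left (Nat.le_of_lt hlt)]
      rw [htake, List.append_assoc]
      have hg : pvGreedy (n + 1) s = ch :: pvGreedy n (s - c) := by
        rw [pvGreedy, if_neg hs]
      rw [hg]
      rfl

theorem pvGreedy_eq (n : Nat) : ∀ s : Int, 0 ≤ s → s ≤ 9 * n →
    pvGreedy n s = List.replicate (PySem.Int.floordiv s 9).toNat '9'
      ++ (if PySem.Int.mod s 9 ≠ 0 then (PySem.Int.toStr (PySem.Int.mod s 9)).toList else [])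
      ++ List.replicate ((n : Int) - PySem.Int.floordiv s 9
          - (if PySem.Int.mod s 9 ≠ 0 then 1 else 0)).toNat '0' := by
  induction n with
  | zero =>
    intro s h0 h9
    have : s = 0 := by omega
    subst this
    decide
  | succ n ih =>
    intro s h0 h9
    rw [PySem.Int.floordiv_eq_ediv_of_pos (by norm_num), PySem.Int.mod_eq_emod_of_pos (by norm_num)]
    by_cases hs : s = 0
    · subst hs
      rw [pvGreedy_zero]
      rw [show (0:Int) / 9 = 0 from by omega, show (0:Int) % 9 = 0 from by omega,
        if_neg (by simp), if_neg (by simp)]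
      simp only [Int.toNat_zero, List.replicate_zero, List.nil_append, List.append_nil]
      congr 1
    · rcases Int.lt_or_le s 9 with hlt | hge
      · -- 0 < s < 9 : one remainder digit then zeros
        have hmin : min s 9 = s := by omega
        have hdig : (PySem.Int.toStr s).toList = [Char.ofNat (48 + s).toNat] := by
          interval_cases s <;> decide
        rw [show s / 9 = 0 from by omega, show s % 9 = s from by omega, if_pos hs, if_pos hs]
        rw [pvGreedy, if_neg hs, hmin, sub_self, pvGreedy_zero, hdig]
        rw [show ((((n+1:Nat)):Int) - 0 - 1).toNat = n from by omega]
        simp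
      · -- s ≥ 9 : emit a nine and recurse on s - 9
        have hmin : min s 9 = 9 := by omega
        rw [pvGreedy, if_neg hs, hmin]
        rw [ih (s - 9) (by omega) (by push_cast; omega),
          PySem.Int.floordiv_eq_ediv_of_pos (by norm_num),
          PySem.Int.mod_eq_emod_of_pos (by norm_num),
          show s / 9 = (s - 9) / 9 + 1 from by omega, show s % 9 = (s - 9) % 9 from by omega]
        have hq0 : 0 ≤ (s - 9) / 9 := Int.ediv_nonneg (by omega) (by norm_num)
        have h9ch : Char.ofNat (48 + (9:Int)).toNat = '9' := by decide
        rw [h9ch]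
        have hrep : List.replicate ((s - 9) / 9 + 1).toNat '9'
            = '9' :: List.replicate ((s - 9) / 9).toNat '9' := by
          rw [show ((s - 9) / 9 + 1).toNat = ((s - 9) / 9).toNat + 1 from by omega,
            List.replicate_succ]
        rw [hrep]
        simp only [List.cons_append]
        congr 3
        push_cast
        omega

theorem pvLoopA_full (num s : Int) (h0 : 0 ≤ num) :
    pvLoopA (PySem.List.pyRange 0 num 1) s (List.replicate num.toNat '0')
      = pvGreedy num.toNat s := by
  have hR : PySem.List.pyRange 0 num 1
      = PySem.List.pyRange ((0 : Nat) : Int) (((0 : Nat) : Int) + (num.toNat : Int)) 1 := by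
    congr 1
    omega
  rw [hR, pvLoopA_spec num.toNat 0 s _ (by simp) (by simp)]
  simp

-- ===== VERDICT (by name: the statement is the Claim_ definition above) =====
theorem maxSumOfSquares_spec : Claim_unchanged_maxSumOfSquares := by
  intro num sum hdom hpre hnd
  unfold maxSumOfSquares maxSumOfSquares_alt
  rcases Int.lt_or_le (9 * num) sum with hg | hg
  · rw [if_pos (by omega), if_pos (Or.inr hg)]
  · rw [if_neg (by omega)]
    rcases Int.lt_or_le sum 0 with hneg | hpos
    · -- impossible target: Pre_ and ¬D_ force num ≤ 0, both sides are ""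
      have hnum : num ≤ 0 := by
        by_contra h
        apply hnd
        refine ⟨hneg, ?_, by omega⟩
        unfold Pre_maxSumOfSquares at hpre
        omega
      rw [if_pos (Or.inl hneg), PySem.List.pyRange_one_eq_nil (by omega),
        Int.toNat_of_nonpos hnum]
      rfl
    · have hnum : 0 ≤ num := by nlinarith
      rw [if_neg (by omega), pvLoopA_full num sum hnum,
        pvGreedy_eq num.toNat sum hpos (by rw [Int.toNat_of_nonneg hnum] at *; omega)]
      rw [Int.toNat_of_nonneg hnum]

theorem maxSumOfSquares_changed : Claim_changed_maxSumOfSquares := by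
  unfold Claim_changed_maxSumOfSquares; decide

theorem maxSumOfSquares_tight : Claim_exact_maxSumOfSquares := by
  intro num sum _ _ hd
  obtain ⟨hs0, _, hn1⟩ := hd
  unfold maxSumOfSquares maxSumOfSquares_alt
  rw [if_neg (by omega), if_pos (Or.inl hs0)]
  intro h
  have hlen : (pvLoopA (PySem.List.pyRange 0 num 1) sum (List.replicate num.toNat '0')).length
      = num.toNat := by rw [pvLoopA_length]; simp
  have hnil : (pvLoopA (PySem.List.pyRange 0 num 1) sum (List.replicate num.toNat '0')) = [] := by
    exact String.ofList_inj.mp h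
  rw [hnil] at hlen
  simp at hlen
  omega
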